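-- pv_equiv track=rewrite | github.com/ekpasowecabronneta-hue/duckclaw | duckclaw/rl/rewards.py | _extract_json_objects
-- ===== SOURCE A (Python) =====
-- def _extract_json_objects(text: str) -> list[str]:
--     """Extrae objetos JSON {...} con anidamiento."""
--     out: list[str] = []
--     i = 0
--     while i < len(text):
--         if text[i] != "{":
--             i += 1
--             continue
--         start = i
--         depth = 0
--         for j in range(i, len(text)):
--             if text[j] == "{":
--                 depth += 1
--             elif text[j] == "}":
--                 depth -= 1
--                 if depth == 0:
--                     out.append(text[start : j + 1])
--                     i = j + 1
--                     break
--         else: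
--             i += 1
--     return out
-- ===== SOURCE B (Python) =====
-- def _extract_json_objects(text: str) -> list[str]:
--     """Extrae objetos JSON {...} con anidamiento (single stack pass)."""
--     # one stack pass: match[i] = index of the '}' closing the '{' at i
--     match: dict[int, int] = {}
--     stack: list[int] = []
--     for j, c in enumerate(text):
--         if c == "{":
--             stack.append(j)
--         elif c == "}":
--             if stack:
--                 match[stack.pop()] = j
--     out: list[str] = []
--     i = 0
--     n = len(text)
--     while i < n:
--         if text[i] == "{" and i in match:
--             j = match[i]
--             out.append(text[i : j + 1])
--             i = j + 1
--         else:
--             i += 1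
--     return out
-- ===== Notes on version B (the rewrite author's own statement) =====
-- stated objective: alternative
-- what changed: Replaced the per-open-brace inner depth rescan with a single stack pass that precomputes each open brace's matching close index in a dict, then one forward scan that emits slices and jumps past matched objects.
import Mathlib
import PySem

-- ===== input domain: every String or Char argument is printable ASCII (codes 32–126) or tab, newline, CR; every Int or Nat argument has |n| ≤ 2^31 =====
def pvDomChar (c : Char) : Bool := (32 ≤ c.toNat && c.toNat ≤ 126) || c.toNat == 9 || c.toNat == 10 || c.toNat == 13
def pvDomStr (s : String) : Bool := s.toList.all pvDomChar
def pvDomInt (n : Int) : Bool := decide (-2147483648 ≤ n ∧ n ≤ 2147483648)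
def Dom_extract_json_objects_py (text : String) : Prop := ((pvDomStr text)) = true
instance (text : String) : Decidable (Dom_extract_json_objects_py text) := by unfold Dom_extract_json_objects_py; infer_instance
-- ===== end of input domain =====

-- B replaces A's per-open-brace inner depth rescan by one stack pass precomputing each
-- open brace's matching close, then a single forward scan emitting slices and jumping.

-- ===== PORT A =====
-- inner 'for j in range(i, len(text))' loop of A: walks the suffix tracking depth,
-- returns the index j where depth returns to 0 (none = loop ran off the end)
def pvFindClose : List Char → Int → Nat → Option Nat
  | [], _, _ => none
  | c :: rest, depth, j =>
    if c = '{' then pvFindClose rest (depth + 1) (j + 1)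
    else if c = '}' then
      if depth - 1 = 0 then some j else pvFindClose rest (depth - 1) (j + 1)
    else pvFindClose rest depth (j + 1)

-- outer 'while i < len(text)' loop of A (fuel = remaining loop iterations; i strictly
-- increases every iteration, so fuel = len(text) + 1 at the entry call is never exhausted)
def pvLoopA (cs : List Char) : Nat → Nat → List String
  | 0, _ => []
  | fuel + 1, i =>
    if h : i < cs.length then
      if cs[i] ≠ '{' then pvLoopA cs fuel (i + 1)
      else
        match pvFindClose (cs.drop i) 0 i with
        | some j =>
            -- text[start : j + 1]
            String.ofList (PySem.List.slice cs (some (i : Int)) (some ((j : Int) + 1))) ::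
              pvLoopA cs fuel (j + 1)
        | none => pvLoopA cs fuel (i + 1)
    else []

def extract_json_objects_py (text : String) : List String :=
  pvLoopA text.toList (text.toList.length + 1) 0

-- ===== PORT B =====
-- single stack pass: match[i] = index of the '}' closing the '{' at i
def pvBuildMatch : List Char → Nat → List Nat → PySem.Dict Nat Nat → PySem.Dict Nat Nat
  | [], _, _, m => m
  | c :: rest, j, stack, m =>
    if c = '{' then pvBuildMatch rest (j + 1) (j :: stack) m
    else if c = '}' then
      match stack with
      | [] => pvBuildMatch rest (j + 1) [] m
      | k :: s => pvBuildMatch rest (j + 1) s (m.insert k j)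
    else pvBuildMatch rest (j + 1) stack m

-- B's 'while i < n' scan: emit and jump at a matched '{', otherwise step by one
-- (same fuel discipline as pvLoopA: i strictly increases every iteration)
def pvLoopB (cs : List Char) (m : PySem.Dict Nat Nat) : Nat → Nat → List String
  | 0, _ => []
  | fuel + 1, i =>
    if h : i < cs.length then
      if hc : cs[i] = '{' ∧ (m.get? i).isSome then
        let j := (m.get? i).get hc.2
        String.ofList (PySem.List.slice cs (some (i : Int)) (some ((j : Int) + 1))) ::
          pvLoopB cs m fuel (j + 1)
      else pvLoopB cs m fuel (i + 1)
    else []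

def extract_json_objects_py_alt (text : String) : List String :=
  pvLoopB text.toList (pvBuildMatch text.toList 0 [] PySem.Dict.empty)
    (text.toList.length + 1) 0

-- ===== PRECONDITION & SPEC =====
def Spec_extract_json_objects_py (text : String) (out : List String) : Prop := out = extract_json_objects_py_alt text
instance (text : String) (out : List String) : Decidable (Spec_extract_json_objects_py text out) := by unfold Spec_extract_json_objects_py; infer_instance

-- ===== CLAIM (what is proved, stated in full; the proofs are below) =====
def Claim_equal_extract_json_objects_py : Prop := ∀ (text : String), Dom_extract_json_objects_py text → Spec_extract_json_objects_py text (extract_json_objects_py text)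

-- ===== LEMMAS AND PROOFS =====

-- one-step unfoldings of A's inner scan
theorem pvFindClose_open (rest : List Char) (d : Int) (j : Nat) :
    pvFindClose ('{' :: rest) d j = pvFindClose rest (d + 1) (j + 1) := by
  simp [pvFindClose]

theorem pvFindClose_close (rest : List Char) (d : Int) (j : Nat) (h : d ≠ 1) :
    pvFindClose ('}' :: rest) d j = pvFindClose rest (d - 1) (j + 1) := by
  simp only [pvFindClose]
  split_ifs with h1 h2
  · exact absurd h1 (by decide)
  · exact (h (by omega)).elim
  · rfl

theorem pvFindClose_close1 (rest : List Char) (j : Nat) :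
    pvFindClose ('}' :: rest) 1 j = some j := by
  simp [pvFindClose]

theorem pvFindClose_other (c : Char) (rest : List Char) (d : Int) (j : Nat)
    (h1 : c ≠ '{') (h2 : c ≠ '}') :
    pvFindClose (c :: rest) d j = pvFindClose rest d (j + 1) := by
  simp only [pvFindClose]
  rw [if_neg h1, if_neg h2]

-- invariant of the stack pass: after consuming cs.drop j, the k-th open position on the
-- stack is exactly (k+1) levels deep, and m records precisely the matches already closed
theorem pvBuildMatch_main : ∀ (rest cs : List Char) (j : Nat) (stack : List Nat)
    (m : PySem.Dict Nat Nat),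
    rest = cs.drop j →
    stack.Pairwise (· > ·) →
    (∀ k ∈ stack, k < j) →
    (∀ (k i : Nat), stack[k]? = some i →
      pvFindClose (cs.drop i) 0 i = pvFindClose rest ((k : Int) + 1) j) →
    (∀ i, cs[i]? = some '{' → i < j → i ∉ stack →
      m.get? i = pvFindClose (cs.drop i) 0 i) →
    (∀ i, (j ≤ i ∨ i ∈ stack) → m.get? i = none) →
    ∀ i, cs[i]? = some '{' →
      (pvBuildMatch rest j stack m).get? i = pvFindClose (cs.drop i) 0 i := by
  intro rest
  induction rest with
  | nil =>
    intro cs j stack m hdrop _ _ hstack hm hnone i hi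
    simp only [pvBuildMatch]
    have hij : i < cs.length := (List.getElem?_eq_some_iff.mp hi).1
    have hjlen : cs.length ≤ j := by
      have h0 : (cs.drop j).length = 0 := by rw [← hdrop]; rfl
      simp at h0; omega
    by_cases hmem : i ∈ stack
    · obtain ⟨k, hk, hke⟩ := List.getElem_of_mem hmem
      have h1 := hstack k i (by rw [List.getElem?_eq_some_iff]; exact ⟨hk, hke⟩)
      rw [h1]
      simp [pvFindClose, hnone i (Or.inr hmem)]
    · exact hm i hi (by omega) hmem
  | cons c rest ih =>
    intro cs j stack m hdrop hpw hsl hstack hm hnone i hi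
    have hcj : cs[j]? = some c := by
      rw [← List.head?_drop, ← hdrop]; rfl
    have hdrop' : rest = cs.drop (j + 1) := by
      rw [← List.tail_drop, ← hdrop]; rfl
    simp only [pvBuildMatch]
    split_ifs with h1 h2
    · -- c = '{' : push j
      subst h1
      refine ih cs (j + 1) (j :: stack) m hdrop' ?_ ?_ ?_ ?_ ?_ i hi
      · exact List.pairwise_cons.mpr ⟨fun k hk => hsl k hk, hpw⟩
      · intro k hk
        rcases List.mem_cons.mp hk with hk | hk
        · omega
        · exact Nat.lt_succ_of_lt (hsl _ hk)
      · intro k i' hk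
        cases k with
        | zero =>
          simp only [List.getElem?_cons_zero, Option.some_inj] at hk
          subst hk
          rw [← hdrop, pvFindClose_open]
          norm_num
        | succ k =>
          simp only [List.getElem?_cons_succ] at hk
          rw [hstack k i' hk, pvFindClose_open]
          congr 1
      · intro i' hi' hlt hmem
        have hne : i' ≠ j := fun he => hmem (he ▸ List.mem_cons_self ..)
        exact hm i' hi' (by omega) (fun hmem' => hmem (List.mem_cons_of_mem _ hmem'))
      · intro i' hi'
        rcases hi' with hi' | hi'
        · exact hnone i' (Or.inl (by omega))
        · rcases List.mem_cons.mp hi' with he | hmem'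
          · exact hnone i' (Or.inl (by omega))
          · exact hnone i' (Or.inr hmem')
    · -- c = '}'
      subst h2
      cases stack with
      | nil =>
        refine ih cs (j + 1) [] m hdrop' (by simp) (by simp) (by simp) ?_ ?_ i hi
        · intro i' hi' hlt hmem
          have hne : i' ≠ j := by
            intro he; subst he; rw [hcj] at hi'; simp at hi'
          exact hm i' hi' (by omega) (by simp)
        · intro i' hi'
          rcases hi' with hi' | hi'
          · exact hnone i' (Or.inl (by omega))
          · simp at hi'
      | cons k0 s =>
        have hk0j : k0 < j := hsl k0 (List.mem_cons_self ..)
        have hk0s : ∀ x ∈ s, x < k0 := fun x hx =>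
          (List.pairwise_cons.mp hpw).1 x hx
        refine ih cs (j + 1) s (m.insert k0 j) hdrop'
          (List.pairwise_cons.mp hpw).2 ?_ ?_ ?_ ?_ i hi
        · intro k hk; exact Nat.lt_succ_of_lt (hsl _ (List.mem_cons_of_mem _ hk))
        · intro k i' hk
          have hh := hstack (k + 1) i' (by simpa using hk)
          rw [hh, pvFindClose_close _ _ _ (by push_cast; omega)]
          congr 1
          omega
        · intro i' hi' hlt hmem
          by_cases he : i' = k0
          · subst he
            rw [PySem.Dict.get?_insert_self]
            have hh := hstack 0 i' (by simp)
            rw [hh]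
            norm_num [pvFindClose_close1]
          · rw [PySem.Dict.get?_insert_of_ne _ _ he]
            have hnej : i' ≠ j := by
              intro hee; subst hee; rw [hcj] at hi'; simp at hi'
            exact hm i' hi' (by omega)
              (fun hmem' => (List.mem_cons.mp hmem').elim he hmem)
        · intro i' hi'
          have hne : i' ≠ k0 := by
            rcases hi' with hi' | hi'
            · omega
            · intro he; subst he; exact absurd (hk0s i' hi') (by omega)
          rw [PySem.Dict.get?_insert_of_ne _ _ hne]
          rcases hi' with hi' | hi'
          · exact hnone i' (Or.inl (by omega))
          · exact hnone i' (Or.inr (List.mem_cons_of_mem _ hi'))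
    · -- other character
      refine ih cs (j + 1) stack m hdrop' hpw ?_ ?_ ?_ ?_ i hi
      · intro k hk; exact Nat.lt_succ_of_lt (hsl _ hk)
      · intro k i' hk
        rw [hstack k i' hk, pvFindClose_other c rest _ _ h1 h2]
      · intro i' hi' hlt hmem
        have hne : i' ≠ j := by
          intro he; subst he; rw [hcj] at hi'
          exact h1 (by simpa using hi')
        exact hm i' hi' (by omega) hmem
      · intro i' hi'
        rcases hi' with hi' | hi'
        · exact hnone i' (Or.inl (by omega))
        · exact hnone i' (Or.inr hi')

-- the precomputed table agrees with A's rescan at every '{'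
theorem pvMatch_char (cs : List Char) (i : Nat) (hi : cs[i]? = some '{') :
    (pvBuildMatch cs 0 [] PySem.Dict.empty).get? i = pvFindClose (cs.drop i) 0 i := by
  refine pvBuildMatch_main cs cs 0 [] PySem.Dict.empty rfl (by simp) (by simp)
    (by intro k i' h; simp at h) (by intro i' _ h; omega) ?_ i hi
  intro i' _; simp [PySem.Dict.get?_empty]

-- one-step unfoldings of the two scans
theorem pvLoopA_stop (cs : List Char) (fuel i : Nat) (h : ¬ i < cs.length) :
    pvLoopA cs (fuel + 1) i = [] := by
  simp [pvLoopA, h]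

theorem pvLoopB_stop (cs : List Char) (m : PySem.Dict Nat Nat) (fuel i : Nat)
    (h : ¬ i < cs.length) : pvLoopB cs m (fuel + 1) i = [] := by
  simp [pvLoopB, h]

theorem pvLoopA_skip (cs : List Char) (fuel i : Nat) (h : i < cs.length)
    (hb : cs[i] ≠ '{') : pvLoopA cs (fuel + 1) i = pvLoopA cs fuel (i + 1) := by
  rw [pvLoopA, dif_pos h, if_pos hb]

theorem pvLoopA_nomatch (cs : List Char) (fuel i : Nat) (h : i < cs.length)
    (hb : cs[i] = '{') (hfc : pvFindClose (cs.drop i) 0 i = none) :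
    pvLoopA cs (fuel + 1) i = pvLoopA cs fuel (i + 1) := by
  rw [pvLoopA, dif_pos h, if_neg (by simp [hb])]
  split
  · next j heq => rw [hfc] at heq; cases heq
  · rfl

theorem pvLoopA_match (cs : List Char) (fuel i j : Nat) (h : i < cs.length)
    (hb : cs[i] = '{') (hfc : pvFindClose (cs.drop i) 0 i = some j) :
    pvLoopA cs (fuel + 1) i =
      String.ofList (PySem.List.slice cs (some (i : Int)) (some ((j : Int) + 1))) ::
        pvLoopA cs fuel (j + 1) := by
  rw [pvLoopA, dif_pos h, if_neg (by simp [hb])]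
  split
  · next j' heq => rw [hfc] at heq; cases heq; rfl
  · next heq => rw [hfc] at heq; cases heq

theorem pvLoopB_skip (cs : List Char) (m : PySem.Dict Nat Nat) (fuel i : Nat)
    (h : i < cs.length) (hnc : ¬ (cs[i] = '{' ∧ (m.get? i).isSome)) :
    pvLoopB cs m (fuel + 1) i = pvLoopB cs m fuel (i + 1) := by
  rw [pvLoopB, dif_pos h, dif_neg hnc]

theorem pvLoopB_match (cs : List Char) (m : PySem.Dict Nat Nat) (fuel i j : Nat)
    (h : i < cs.length) (hb : cs[i] = '{') (hc : m.get? i = some j) :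
    pvLoopB cs m (fuel + 1) i =
      String.ofList (PySem.List.slice cs (some (i : Int)) (some ((j : Int) + 1))) ::
        pvLoopB cs m fuel (j + 1) := by
  rw [pvLoopB]
  have hcond : cs[i] = '{' ∧ (m.get? i).isSome := ⟨hb, by simp [hc]⟩
  rw [dif_pos h, dif_pos hcond]
  simp [hc]

-- the two scans produce the same list, position by position (fuel in lockstep)
theorem pvLoops_eq : ∀ (fuel : Nat) (cs : List Char) (m : PySem.Dict Nat Nat)
    (hchar : ∀ i, cs[i]? = some '{' → m.get? i = pvFindClose (cs.drop i) 0 i)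
    (i : Nat), pvLoopA cs fuel i = pvLoopB cs m fuel i := by
  intro fuel
  induction fuel with
  | zero => intro cs m _ i; rfl
  | succ fuel ih =>
    intro cs m hchar i
    by_cases h : i < cs.length
    · by_cases hb : cs[i] = '{'
      · have hgi : cs[i]? = some '{' := by
          rw [List.getElem?_eq_getElem h, hb]
        have hc := hchar i hgi
        rcases hfc : pvFindClose (cs.drop i) 0 i with _ | j
        · rw [hfc] at hc
          rw [pvLoopA_nomatch cs fuel i h hb hfc,
            pvLoopB_skip cs m fuel i h (by rintro ⟨_, hs⟩; rw [hc] at hs; simp at hs)]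
          exact ih cs m hchar (i + 1)
        · rw [hfc] at hc
          rw [pvLoopA_match cs fuel i j h hb hfc, pvLoopB_match cs m fuel i j h hb hc]
          rw [ih cs m hchar (j + 1)]
      · rw [pvLoopA_skip cs fuel i h hb,
          pvLoopB_skip cs m fuel i h (fun hcc => hb hcc.1)]
        exact ih cs m hchar (i + 1)
    · rw [pvLoopA_stop cs fuel i h, pvLoopB_stop cs m fuel i h]

-- ===== VERDICT (by name: the statement is the Claim_ definition above) =====
theorem extract_json_objects_py_spec : Claim_equal_extract_json_objects_py := by
  intro text _
  unfold Spec_extract_json_objects_py extract_json_objects_py extract_json_objects_py_alt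
  exact pvLoops_eq (text.toList.length + 1) text.toList _
    (fun i hi => pvMatch_char text.toList i hi) 0
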